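-- pv_equiv track=rewrite | github.com/grapheneaffiliate/h4-polytopic-attention | solve_arc_b15.py | solve_a61ba2ce
-- ===== SOURCE A (Python) =====
-- def solve_a61ba2ce(grid):
--     rows, cols = len(grid), len(grid[0])
--     # Find all colored blobs
--     visited = [[False]*cols for _ in range(rows)]
--     pieces = []
--     for r in range(rows):
--         for c in range(cols):
--             if grid[r][c] != 0 and not visited[r][c]:
--                 color = grid[r][c]
--                 cells = []
--                 queue = [(r, c)]
--                 visited[r][c] = True
--                 while queue:
--                     cr, cc = queue.pop(0)
--                     cells.append((cr, cc))
--                     for dr, dc in [(-1,0),(1,0),(0,-1),(0,1)]: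
--                         nr, nc = cr+dr, cc+dc
--                         if 0 <= nr < rows and 0 <= nc < cols and not visited[nr][nc] and grid[nr][nc] == color:
--                             visited[nr][nc] = True
--                             queue.append((nr, nc))
--                 pieces.append((color, cells))
--
--     # For each piece, determine its L-shape orientation
--     # Normalize to 2x2 bounding box
--     corner_pieces = {}  # 'TL', 'TR', 'BL', 'BR' -> (color, 2x2 pattern)
--     for color, cells in pieces:
--         rmin = min(r for r, c in cells)
--         cmin = min(c for r, c in cells)
--         # Create 2x2 pattern
--         pattern = [[0,0],[0,0]]
--         for r, c in cells:
--             pattern[r-rmin][c-cmin] = color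
--
--         # Determine which corner is empty (the 0 in the 2x2)
--         if pattern[0][0] == 0:  # empty top-left -> L points up-left -> goes to bottom-right
--             corner_pieces['BR'] = (color, pattern)
--         elif pattern[0][1] == 0:  # empty top-right -> L points up-right -> goes to bottom-left
--             corner_pieces['BL'] = (color, pattern)
--         elif pattern[1][0] == 0:  # empty bottom-left -> L points down-left -> goes to top-right
--             corner_pieces['TR'] = (color, pattern)
--         elif pattern[1][1] == 0:  # empty bottom-right -> L points down-right -> goes to top-left
--             corner_pieces['TL'] = (color, pattern)
--
--     # Build 4x4 output
--     out = [[0]*4 for _ in range(4)]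
--     if 'TL' in corner_pieces:
--         p = corner_pieces['TL'][1]
--         for r in range(2):
--             for c in range(2):
--                 out[r][c] = p[r][c]
--     if 'TR' in corner_pieces:
--         p = corner_pieces['TR'][1]
--         for r in range(2):
--             for c in range(2):
--                 out[r][c+2] = p[r][c]
--     if 'BL' in corner_pieces:
--         p = corner_pieces['BL'][1]
--         for r in range(2):
--             for c in range(2):
--                 out[r+2][c] = p[r][c]
--     if 'BR' in corner_pieces:
--         p = corner_pieces['BR'][1]
--         for r in range(2):
--             for c in range(2):
--                 out[r+2][c+2] = p[r][c]
--
--     return out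
-- ===== SOURCE B (Python) =====
-- def solve_a61ba2ce(grid):
--     rows, cols = len(grid), len(grid[0])
--
--     # Collect the cells of each piece, keyed by its color, in row-major order.
--     pieces = {}
--     for r in range(rows):
--         for c in range(cols):
--             v = grid[r][c]
--             if v != 0:
--                 pieces.setdefault(v, []).append((r, c))
--
--     # Normalize each piece to its 2x2 bounding box and write it into the
--     # quadrant opposite its empty corner.
--     out = [[0] * 4 for _ in range(4)]
--     for color, cells in pieces.items():
--         rmin = min(r for r, c in cells)
--         cmin = min(c for r, c in cells)
--         pattern = [[0, 0], [0, 0]]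
--         for r, c in cells:
--             pattern[r - rmin][c - cmin] = color
--         if pattern[0][0] == 0:
--             R, C = 2, 2
--         elif pattern[0][1] == 0:
--             R, C = 2, 0
--         elif pattern[1][0] == 0:
--             R, C = 0, 2
--         elif pattern[1][1] == 0:
--             R, C = 0, 0
--         else:
--             continue
--         for i in range(2):
--             for j in range(2):
--                 out[R + i][C + j] = pattern[i][j]
--     return out
-- ===== Notes on version B (the rewrite author's own statement) =====
-- stated objective: simpler
-- what changed: B drops the BFS flood fill, visited matrix and corner dictionary entirely: one row-major pass groups the nonzero cells by their color into a dict (in this task each L-piece has its own color), then each color's cell list is normalized to its 2x2 box and written straight into its quadrant; Pre_ excludes grids in which one nonzero color forms more than one connected blob, where B's by-color piece identification raises or merges blobs that A's flood fill keeps separate.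
-- outside the precondition, e.g. on solve_a61ba2ce([[1, 0, 1]]): A returns [[0, 0, 0, 0], [0, 0, 0, 0], [1, 0, 0, 0], [0, 0, 0, 0]], B raises
import Mathlib
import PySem

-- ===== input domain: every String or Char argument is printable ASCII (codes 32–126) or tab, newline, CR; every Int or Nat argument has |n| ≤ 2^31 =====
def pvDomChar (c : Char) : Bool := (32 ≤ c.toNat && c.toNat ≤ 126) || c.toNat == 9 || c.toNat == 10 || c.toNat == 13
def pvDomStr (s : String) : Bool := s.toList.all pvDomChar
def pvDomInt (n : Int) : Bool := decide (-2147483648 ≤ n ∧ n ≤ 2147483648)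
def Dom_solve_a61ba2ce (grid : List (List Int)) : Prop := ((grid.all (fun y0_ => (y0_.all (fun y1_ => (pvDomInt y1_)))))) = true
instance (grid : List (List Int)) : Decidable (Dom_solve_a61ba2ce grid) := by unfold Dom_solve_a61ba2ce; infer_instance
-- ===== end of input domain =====

-- B replaces A's BFS flood fill, visited matrix and corner dictionary by one row-major pass that
-- groups the nonzero cells by their color into a dict and then writes each color's piece straight
-- into its quadrant.  Objective: simpler.  Equal on Pre_ (each color one blob, see Pre_ below).

-- ===== PORT A =====
-- shared low-level helpers (plain 2-d list read/write, used by both ports)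
def pvGetI (grid : List (List Int)) (r c : Int) : Int :=
  ((PySem.List.pyGet? ((PySem.List.pyGet? grid r).getD []) c).getD 0)

def pvSet2 (p : List (List Int)) (i j : Int) (v : Int) : List (List Int) :=
  p.set i.toNat (((PySem.List.pyGet? p i).getD []).set j.toNat v)

def pvGetV (vis : List (List Bool)) (r c : Int) : Bool :=
  ((PySem.List.pyGet? ((PySem.List.pyGet? vis r).getD []) c).getD false)

def pvSetV (vis : List (List Bool)) (r c : Int) : List (List Bool) :=
  vis.set r.toNat (((PySem.List.pyGet? vis r).getD []).set c.toNat true)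

-- out[R+i][C+j] = p[i][j] for i,j in range(2) (the quadrant-copy loop both pythons contain)
def pvWriteQ (out : List (List Int)) (p : List (List Int)) (R C : Int) : List (List Int) :=
  (PySem.List.pyRange 0 2 1).foldl (fun out i =>
    (PySem.List.pyRange 0 2 1).foldl (fun out j =>
      pvSet2 out (R + i) (C + j) (pvGetI p i j)) out) out

-- the BFS while-loop of A; fuel bounds the iteration count (rows*cols+5 always suffices:
-- each iteration pops one queue element and every push marks an unvisited cell visited)
def pvBfs (grid : List (List Int)) (rows cols color : Int) :
    Nat → List (Int × Int) → List (Int × Int) → List (List Bool) →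
    List (Int × Int) × List (List Bool)
  | 0, _, cells, vis => (cells, vis)
  | _ + 1, [], cells, vis => (cells, vis)
  | fuel + 1, q :: queue, cells, vis =>
    let st := [((-1 : Int), (0 : Int)), (1, 0), (0, -1), (0, 1)].foldl
      (fun (st : List (Int × Int) × List (List Bool)) d =>
        let nr := q.1 + d.1
        let nc := q.2 + d.2
        if 0 ≤ nr ∧ nr < rows ∧ 0 ≤ nc ∧ nc < cols ∧ ¬ (pvGetV st.2 nr nc = true) ∧
            pvGetI grid nr nc = color
        then (st.1 ++ [(nr, nc)], pvSetV st.2 nr nc)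
        else st) (queue, vis)
    pvBfs grid rows cols color fuel st.1 (cells ++ [(q.1, q.2)]) st.2

-- body of A's double scan loop (phase 1): find an unvisited nonzero cell, flood-fill its blob
def pvScanCell (grid : List (List Int)) (rows cols : Int)
    (st : List (List Bool) × List (Int × List (Int × Int))) (r c : Int) :
    List (List Bool) × List (Int × List (Int × Int)) :=
  if pvGetI grid r c ≠ 0 ∧ ¬ (pvGetV st.1 r c = true) then
    let color := pvGetI grid r c
    let res := pvBfs grid rows cols color (rows.toNat * cols.toNat + 5)
      [(r, c)] [] (pvSetV st.1 r c)
    (res.2, st.2 ++ [(color, res.1)])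
  else st

-- phase 2 body: normalise a piece to its 2x2 pattern and file it under its corner
def pvClassify (d : PySem.Dict String (Int × List (List Int)))
    (piece : Int × List (Int × Int)) : PySem.Dict String (Int × List (List Int)) :=
  let color := piece.1
  let cells := piece.2
  let rmin := (PySem.List.min? (cells.map Prod.fst) (fun x => x)).getD 0
  let cmin := (PySem.List.min? (cells.map Prod.snd) (fun x => x)).getD 0
  let pattern := cells.foldl
    (fun p rc => pvSet2 p (rc.1 - rmin) (rc.2 - cmin) color) [[0, 0], [0, 0]]
  if pvGetI pattern 0 0 = 0 then d.insert "BR" (color, pattern)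
  else if pvGetI pattern 0 1 = 0 then d.insert "BL" (color, pattern)
  else if pvGetI pattern 1 0 = 0 then d.insert "TR" (color, pattern)
  else if pvGetI pattern 1 1 = 0 then d.insert "TL" (color, pattern)
  else d

-- phase 3: assemble the 4x4 output from the corner dictionary
def pvAssemble (d : PySem.Dict String (Int × List (List Int))) : List (List Int) :=
  let out : List (List Int) := List.replicate 4 (List.replicate 4 0)
  let out := match d.get? "TL" with | some p => pvWriteQ out p.2 0 0 | none => out
  let out := match d.get? "TR" with | some p => pvWriteQ out p.2 0 2 | none => out
  let out := match d.get? "BL" with | some p => pvWriteQ out p.2 2 0 | none => out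
  match d.get? "BR" with | some p => pvWriteQ out p.2 2 2 | none => out

def solve_a61ba2ce (grid : List (List Int)) : List (List Int) :=
  let rows : Int := grid.length
  let cols : Int := ((PySem.List.pyGet? grid 0).getD []).length
  let vis0 : List (List Bool) := List.replicate rows.toNat (List.replicate cols.toNat false)
  let st := (PySem.List.pyRange 0 rows 1).foldl (fun st r =>
    (PySem.List.pyRange 0 cols 1).foldl (fun st c => pvScanCell grid rows cols st r c) st)
    (vis0, [])
  let d := st.2.foldl pvClassify (PySem.Dict.mk [])
  pvAssemble d

-- ===== PORT B =====
-- Source B's grouping step: pieces.setdefault(v, []).append((r, c)) for a nonzero cell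
def pvStepB (grid : List (List Int))
    (d : PySem.Dict Int (List (Int × Int))) (r c : Int) :
    PySem.Dict Int (List (Int × Int)) :=
  let v := pvGetI grid r c
  if v ≠ 0 then d.modify v [] (fun l => l ++ [(r, c)]) else d

-- Source B's per-piece block: normalise the cells to their 2x2 box, write the quadrant
def pvPieceB (out : List (List Int)) (piece : Int × List (Int × Int)) : List (List Int) :=
  let color := piece.1
  let cells := piece.2
  let rmin := (PySem.List.min? (cells.map Prod.fst) (fun x => x)).getD 0
  let cmin := (PySem.List.min? (cells.map Prod.snd) (fun x => x)).getD 0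
  let pattern := cells.foldl
    (fun p rc => pvSet2 p (rc.1 - rmin) (rc.2 - cmin) color) [[0, 0], [0, 0]]
  if pvGetI pattern 0 0 = 0 then pvWriteQ out pattern 2 2
  else if pvGetI pattern 0 1 = 0 then pvWriteQ out pattern 2 0
  else if pvGetI pattern 1 0 = 0 then pvWriteQ out pattern 0 2
  else if pvGetI pattern 1 1 = 0 then pvWriteQ out pattern 0 0
  else out

def solve_a61ba2ce_alt (grid : List (List Int)) : List (List Int) :=
  let rows : Int := grid.length
  let cols : Int := ((PySem.List.pyGet? grid 0).getD []).length
  let d := (PySem.List.pyRange 0 rows 1).foldl (fun d r =>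
    (PySem.List.pyRange 0 cols 1).foldl (fun d c => pvStepB grid d r c) d)
    (PySem.Dict.mk [])
  let out0 : List (List Int) := List.replicate 4 (List.replicate 4 0)
  d.items.foldl pvPieceB out0

-- ===== PRECONDITION & SPEC =====
-- bounds-checked read (0 outside the grid window), used by the precondition below
def pvG (grid : List (List Int)) (cols r c : Int) : Int :=
  if 0 ≤ r ∧ r < grid.length ∧ 0 ≤ c ∧ c < cols then pvGetI grid r c else 0

-- each nonzero color is a single blob fitting a 2x2 box: any two of its cells are at Chebyshev
-- distance ≤ 1 and, when diagonal, share a same-colored common neighbour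
def pvColorOK (grid : List (List Int)) (cols : Int) : Bool :=
  (List.range grid.length).all fun r => (List.range cols.toNat).all fun c =>
  (List.range grid.length).all fun r' => (List.range cols.toNat).all fun c' =>
    pvG grid cols r c == 0 || pvG grid cols r' c' != pvG grid cols r c ||
      (decide (((r : Int) - (r' : Int)).natAbs ≤ 1) &&
       decide (((c : Int) - (c' : Int)).natAbs ≤ 1) &&
       ((r : Int) == (r' : Int) || (c : Int) == (c' : Int) ||
        pvG grid cols r c' == pvG grid cols r c ||
        pvG grid cols r' c == pvG grid cols r c))

-- Pre_ excludes: the empty grid and rows shorter than cols (A raises IndexError), blobs not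
-- fitting a 2x2 box (A's pattern[r-rmin][c-cmin] raises IndexError), and grids where one nonzero
-- color forms more than one connected blob — there B, which identifies pieces by color, raises or
-- merges the blobs that A's flood fill keeps separate (in the task each piece has its own color).
def Pre_solve_a61ba2ce (grid : List (List Int)) : Prop :=
  grid ≠ [] ∧
  (∀ row ∈ grid, ((PySem.List.pyGet? grid 0).getD []).length ≤ row.length) ∧
  pvColorOK grid ((PySem.List.pyGet? grid 0).getD []).length = true

instance (grid : List (List Int)) : Decidable (Pre_solve_a61ba2ce grid) := by
  unfold Pre_solve_a61ba2ce; infer_instance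

def pvWitness_solve_a61ba2ce : List (List Int) := [[1, 1, 0], [1, 0, 0], [0, 0, 2]]

def Spec_solve_a61ba2ce (grid : List (List Int)) (out : List (List Int)) : Prop := out = solve_a61ba2ce_alt grid
instance (grid : List (List Int)) (out : List (List Int)) : Decidable (Spec_solve_a61ba2ce grid out) := by unfold Spec_solve_a61ba2ce; infer_instance

-- ===== CLAIM (what is proved, stated in full; the proofs are below) =====
def Claim_equal_solve_a61ba2ce : Prop := ∀ (grid : List (List Int)), Dom_solve_a61ba2ce grid → Pre_solve_a61ba2ce grid → Spec_solve_a61ba2ce grid (solve_a61ba2ce grid)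

-- ===== LEMMAS AND PROOFS =====

-- ---------- proof-side abbreviations ----------
def pvInR (grid : List (List Int)) (cols : Int) (x : Int × Int) : Prop :=
  0 ≤ x.1 ∧ x.1 < grid.length ∧ 0 ≤ x.2 ∧ x.2 < cols

def pvAdj (x y : Int × Int) : Prop :=
  (x.1 = y.1 ∧ (y.2 = x.2 + 1 ∨ y.2 = x.2 - 1)) ∨ (x.2 = y.2 ∧ (y.1 = x.1 + 1 ∨ y.1 = x.1 - 1))

def pvShape (grid : List (List Int)) (cols : Int) (vis : List (List Bool)) : Prop :=
  vis.length = grid.length ∧ ∀ row ∈ vis, row.length = cols.toNat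

abbrev pvRmLt (m pos : Int × Int) : Prop := m.1 < pos.1 ∨ (m.1 = pos.1 ∧ m.2 < pos.2)

-- the grid's cells in row-major order, and the cells carrying a given value
def pvRowCells (nc : Nat) (r : Nat) : List (Int × Int) :=
  (List.range nc).map (fun c : Nat => ((r : Int), (c : Int)))

def pvAllCells (nr nc : Nat) : List (Int × Int) :=
  (List.range nr).flatMap (pvRowCells nc)

def pvCellsOf (grid : List (List Int)) (cols v : Int) : List (Int × Int) :=
  (pvAllCells grid.length cols.toNat).filter (fun x => pvG grid cols x.1 x.2 == v)

-- ---------- basic getters ----------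
theorem pvG_inR {grid : List (List Int)} {cols r c : Int}
    (h : pvG grid cols r c ≠ 0) : pvInR grid cols (r, c) := by
  by_contra hn
  simp only [pvG, pvInR] at h hn
  exact h (if_neg hn)

theorem pvG_eq_pvGetI {grid : List (List Int)} {cols r c : Int}
    (h : pvInR grid cols (r, c)) : pvG grid cols r c = pvGetI grid r c := by
  obtain ⟨h1, h2, h3, h4⟩ := h
  simp [pvG, h1, h2, h3, h4]

theorem mem_allCells {nr nc : Nat} {x : Int × Int} :
    x ∈ pvAllCells nr nc ↔ 0 ≤ x.1 ∧ x.1 < (nr : Int) ∧ 0 ≤ x.2 ∧ x.2 < (nc : Int) := by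
  obtain ⟨x1, x2⟩ := x
  simp only [pvAllCells, pvRowCells, List.mem_flatMap, List.mem_map, List.mem_range,
    Prod.mk.injEq]
  constructor
  · rintro ⟨r, hr, c, hc, h1, h2⟩
    subst h1; subst h2
    refine ⟨by positivity, by exact_mod_cast hr, by positivity, by exact_mod_cast hc⟩
  · rintro ⟨h1, h2, h3, h4⟩
    exact ⟨x1.toNat, by omega, ⟨x2.toNat, by omega, by omega, by omega⟩⟩

theorem pairwise_allCells {nr nc : Nat} : (pvAllCells nr nc).Pairwise pvRmLt := by
  unfold pvAllCells
  induction nr with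
  | zero => simp
  | succ k ih =>
    rw [List.range_succ, List.flatMap_append]
    rw [List.pairwise_append]
    refine ⟨ih, ?_, ?_⟩
    · simp only [List.flatMap_cons, List.flatMap_nil, List.append_nil, pvRowCells]
      refine List.Pairwise.map _ ?_ (List.pairwise_lt_range (n := nc))
      intro a b hab
      exact Or.inr ⟨rfl, by dsimp only; exact_mod_cast hab⟩
    · intro a ha b hb
      obtain ⟨r, hr, hmem⟩ := List.mem_flatMap.mp ha
      rw [List.mem_range] at hr
      obtain ⟨c, _, hc⟩ := List.mem_map.mp hmem
      simp only [List.flatMap_cons, List.flatMap_nil, List.append_nil, pvRowCells] at hb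
      obtain ⟨c', _, hc'⟩ := List.mem_map.mp hb
      subst hc; subst hc'
      exact Or.inl (by dsimp only; exact_mod_cast hr)

theorem mem_cellsOf {grid : List (List Int)} {cols v : Int} {x : Int × Int} :
    x ∈ pvCellsOf grid cols v ↔ pvInR grid cols x ∧ pvG grid cols x.1 x.2 = v := by
  unfold pvCellsOf
  rw [List.mem_filter, mem_allCells, beq_iff_eq]
  unfold pvInR
  constructor
  · rintro ⟨⟨h1, h2, h3, h4⟩, h5⟩
    exact ⟨⟨h1, by omega, h3, by omega⟩, h5⟩
  · rintro ⟨⟨h1, h2, h3, h4⟩, h5⟩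
    exact ⟨⟨h1, by omega, h3, by omega⟩, h5⟩

theorem pairwise_cellsOf {grid : List (List Int)} {cols v : Int} :
    (pvCellsOf grid cols v).Pairwise pvRmLt :=
  List.Pairwise.sublist List.filter_sublist pairwise_allCells

theorem length_allCells {nr nc : Nat} : (pvAllCells nr nc).length = nr * nc := by
  unfold pvAllCells
  induction nr with
  | zero => simp
  | succ k ih =>
    rw [List.range_succ, List.flatMap_append]
    simp only [List.length_append, ih, List.flatMap_cons, List.flatMap_nil, List.append_nil,
      pvRowCells, List.length_map, List.length_range]
    ring

theorem length_cellsOf_le {grid : List (List Int)} {cols v : Int} :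
    (pvCellsOf grid cols v).length ≤ grid.length * cols.toNat := by
  calc (pvCellsOf grid cols v).length ≤ (pvAllCells grid.length cols.toNat).length :=
        List.length_filter_le _ _
    _ = grid.length * cols.toNat := length_allCells

theorem self_mem_cellsOf {grid : List (List Int)} {cols r c : Int}
    (h : pvG grid cols r c ≠ 0) : (r, c) ∈ pvCellsOf grid cols (pvG grid cols r c) :=
  mem_cellsOf.mpr ⟨pvG_inR h, rfl⟩

-- the head of a pairwise-pvRmLt list is its row-major minimum
theorem head_min {l : List (Int × Int)} {m : Int × Int}
    (hp : l.Pairwise pvRmLt) (hm : l.head? = some m) :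
    ∀ x ∈ l, x = m ∨ pvRmLt m x := by
  obtain ⟨t, rfl⟩ := List.head?_eq_some_iff.mp hm
  intro x hx
  rcases List.mem_cons.mp hx with h | h
  · exact Or.inl h
  · exact Or.inr ((List.pairwise_cons.mp hp).1 x h)

theorem not_rmlt_of_head {l : List (Int × Int)} {m : Int × Int}
    (hp : l.Pairwise pvRmLt) (hm : l.head? = some m) :
    ∀ x ∈ l, ¬ pvRmLt x m := by
  intro x hx
  rcases head_min hp hm x hx with h | h
  · subst h; unfold pvRmLt; omega
  · unfold pvRmLt at *; omega

-- ---------- the precondition, read back on pairs of same-colored cells ----------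
theorem colorOK_pair {grid : List (List Int)} {cols : Int}
    (hcons : pvColorOK grid cols = true) {v : Int} (hv : v ≠ 0) {x y : Int × Int}
    (hx : x ∈ pvCellsOf grid cols v) (hy : y ∈ pvCellsOf grid cols v) :
    (x.1 - y.1).natAbs ≤ 1 ∧ (x.2 - y.2).natAbs ≤ 1 ∧
      (x.1 = y.1 ∨ x.2 = y.2 ∨ pvG grid cols x.1 y.2 = v ∨ pvG grid cols y.1 x.2 = v) := by
  obtain ⟨⟨hx1, hx2, hx3, hx4⟩, hxg⟩ := mem_cellsOf.mp hx
  obtain ⟨⟨hy1, hy2, hy3, hy4⟩, hyg⟩ := mem_cellsOf.mp hy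
  simp only [pvColorOK, List.all_eq_true, List.mem_range] at hcons
  have := hcons x.1.toNat (by omega) x.2.toNat (by omega) y.1.toNat (by omega) y.2.toNat (by omega)
  have e1 : (x.1.toNat : Int) = x.1 := by omega
  have e2 : (x.2.toNat : Int) = x.2 := by omega
  have e3 : (y.1.toNat : Int) = y.1 := by omega
  have e4 : (y.2.toNat : Int) = y.2 := by omega
  rw [e1, e2, e3, e4] at this
  simp only [Bool.or_eq_true, Bool.and_eq_true, beq_iff_eq, bne_iff_ne, ne_eq,
    decide_eq_true_eq] at this
  rw [hxg, hyg] at this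
  exact ⟨by tauto, by tauto, by tauto⟩

-- ---------- visited matrix ----------
theorem shape_init {grid : List (List Int)} {cols : Int} :
    pvShape grid cols (List.replicate grid.length (List.replicate cols.toNat false)) := by
  refine ⟨by simp, ?_⟩
  intro row hrow
  simp only [List.mem_replicate] at hrow
  rw [hrow.2]; simp

theorem setV_shape {grid : List (List Int)} {cols : Int} {vis : List (List Bool)}
    (hs : pvShape grid cols vis) {i j : Int} (hi : pvInR grid cols (i, j)) :
    pvShape grid cols (pvSetV vis i j) := by
  obtain ⟨hl, hr⟩ := hs
  refine ⟨by simp [pvSetV, hl], ?_⟩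
  intro row hrow
  rcases List.mem_or_eq_of_mem_set hrow with h | h
  · exact hr row h
  · subst h
    have hib : i < (vis.length : Int) := by
      obtain ⟨hi1, hi2, _, _⟩ := hi; omega
    rw [PySem.List.pyGet?_eq_some_getElem vis hi.1 hib]
    simp only [Option.getD_some, List.length_set]
    exact hr _ (List.getElem_mem _)

theorem getV_eq {grid : List (List Int)} {cols : Int} {vis : List (List Bool)}
    (hs : pvShape grid cols vis) {r c : Int} (hin : pvInR grid cols (r, c)) :
    pvGetV vis r c = (vis[r.toNat]?.getD []).getD c.toNat false := by
  obtain ⟨hl, hrows⟩ := hs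
  obtain ⟨h1, h2, h3, h4⟩ := hin
  unfold pvGetV
  rw [PySem.List.pyGet?_of_nonneg _ h1, PySem.List.pyGet?_of_nonneg _ h3]
  rw [List.getD_eq_getElem?_getD]

theorem setV_getV {grid : List (List Int)} {cols : Int} {vis : List (List Bool)}
    (hs : pvShape grid cols vis) {i j r c : Int}
    (hi : pvInR grid cols (i, j)) (hr : pvInR grid cols (r, c)) :
    pvGetV (pvSetV vis i j) r c = if r = i ∧ c = j then true else pvGetV vis r c := by
  have hs' := setV_shape hs hi
  rw [getV_eq hs' hr, getV_eq hs hr]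
  obtain ⟨hl, hrows⟩ := hs
  obtain ⟨hi1, hi2, hi3, hi4⟩ := hi
  obtain ⟨hr1, hr2, hr3, hr4⟩ := hr
  simp only at hi1 hi2 hi3 hi4 hr1 hr2 hr3 hr4
  rcases hvi : vis[i.toNat]? with _ | rowI
  · rw [List.getElem?_eq_none_iff] at hvi; omega
  have hrl : rowI.length = cols.toNat := hrows _ (List.mem_of_getElem? hvi)
  unfold pvSetV
  rw [PySem.List.pyGet?_of_nonneg _ hi1, hvi]
  simp only [Option.getD_some]
  rw [List.getElem?_set]
  by_cases hri : r = i
  · subst hri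
    have hb1 : r.toNat < vis.length := by omega
    simp only [hb1, if_true, Option.getD_some]
    rw [List.getD_eq_getElem?_getD, List.getElem?_set]
    by_cases hcj : c = j
    · subst hcj
      have hb2 : c.toNat < rowI.length := by omega
      simp [hb2]
    · have hne2 : j.toNat ≠ c.toNat := by omega
      simp only [hne2, if_false, hcj, and_false]
      rw [hvi]
      simp [List.getD_eq_getElem?_getD]
  · have hne : i.toNat ≠ r.toNat := by omega
    simp only [hne, if_false, hri, false_and]

-- ---------- one neighbour-step of the BFS inner loop ----------
theorem pvStepOne {grid : List (List Int)} {cols rows color : Int} {P : Int × Int → Prop}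
    (hrows : rows = (grid.length : Int))
    {vis : List (List Bool)} (hs : pvShape grid cols vis)
    (hP : ∀ x, pvInR grid cols x → (pvGetV vis x.1 x.2 = true ↔ P x))
    (queue : List (Int × Int)) (a b : Int) :
    ∃ L W,
      ((if 0 ≤ a ∧ a < rows ∧ 0 ≤ b ∧ b < cols ∧ ¬ (pvGetV vis a b = true) ∧
            pvGetI grid a b = color
        then (queue ++ [(a, b)], pvSetV vis a b) else (queue, vis)) = (queue ++ L, W)) ∧
      pvShape grid cols W ∧
      (∀ x, pvInR grid cols x → (pvGetV W x.1 x.2 = true ↔ P x ∨ x ∈ L)) ∧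
      (∀ x, x ∈ L ↔ (x = (a, b) ∧ pvInR grid cols x ∧ pvG grid cols x.1 x.2 = color ∧ ¬ P x)) ∧
      L.length ≤ 1 := by
  by_cases hc : pvInR grid cols (a, b) ∧ pvG grid cols a b = color ∧ ¬ P (a, b)
  · obtain ⟨hin, hg, hnp⟩ := hc
    have hcond : 0 ≤ a ∧ a < rows ∧ 0 ≤ b ∧ b < cols ∧ ¬ (pvGetV vis a b = true) ∧
        pvGetI grid a b = color := by
      obtain ⟨h1, h2, h3, h4⟩ := hin
      refine ⟨h1, by omega, h3, h4, ?_, ?_⟩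
      · intro ht; exact hnp ((hP (a, b) ⟨h1, h2, h3, h4⟩).mp ht)
      · rw [← hg]; simp [pvG, h1, h2, h3, h4]
    refine ⟨[(a, b)], pvSetV vis a b, by rw [if_pos hcond], setV_shape hs hin, ?_, ?_, by simp⟩
    · intro x hx
      rw [setV_getV hs hin hx]
      constructor
      · intro ht
        by_cases hxe : x = (a, b)
        · exact Or.inr (by simp [hxe])
        · rw [if_neg (by rintro ⟨u, w⟩; exact hxe (Prod.ext u w))] at ht
          exact Or.inl ((hP x hx).mp ht)
      · rintro (hp | hm)
        · by_cases hxe : x.1 = a ∧ x.2 = b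
          · rw [if_pos hxe]
          · rw [if_neg hxe]; exact (hP x hx).mpr hp
        · simp only [List.mem_singleton] at hm
          subst hm; simp
    · intro x
      simp only [List.mem_singleton]
      constructor
      · intro hxe; subst hxe; exact ⟨rfl, hin, hg, hnp⟩
      · intro ⟨hxe, _⟩; exact hxe
  · have hcond : ¬ (0 ≤ a ∧ a < rows ∧ 0 ≤ b ∧ b < cols ∧ ¬ (pvGetV vis a b = true) ∧
        pvGetI grid a b = color) := by
      intro ⟨h1, h2, h3, h4, h5, h6⟩
      have hin : pvInR grid cols ((a : Int), b) := ⟨h1, by omega, h3, h4⟩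
      refine hc ⟨hin, ?_, ?_⟩
      · rw [← h6]; simp only [pvG]; rw [if_pos]
        exact ⟨h1, by omega, h3, h4⟩
      · intro hp; exact h5 ((hP (a, b) hin).mpr hp)
    refine ⟨[], vis, by rw [if_neg hcond]; simp, hs, ?_, ?_, by simp⟩
    · intro x hx; simp only [List.not_mem_nil, or_false]; exact hP x hx
    · intro x
      simp only [List.not_mem_nil, false_iff]
      rintro ⟨hxe, hin, hg, hnp⟩
      subst hxe
      exact hc ⟨hin, hg, hnp⟩

theorem adj_iff {q x : Int × Int} :
    pvAdj q x ↔ (x = (q.1 + -1, q.2 + 0) ∨ x = (q.1 + 1, q.2 + 0) ∨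
      x = (q.1 + 0, q.2 + -1) ∨ x = (q.1 + 0, q.2 + 1)) := by
  obtain ⟨q1, q2⟩ := q
  obtain ⟨x1, x2⟩ := x
  simp only [pvAdj, Prod.mk.injEq]
  omega

theorem len_le_one_cases {α : Type} {L : List α} {y : α}
    (hm : ∀ x ∈ L, x = y) (hl : L.length ≤ 1) : L = [] ∨ L = [y] := by
  match L with
  | [] => exact Or.inl rfl
  | a :: t =>
    match t with
    | [] => exact Or.inr (by rw [hm a (by simp)])
    | b :: u => simp at hl

theorem bfs_round {grid : List (List Int)} {cols rows color : Int} {P : Int × Int → Prop}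
    (hrows : rows = (grid.length : Int))
    {vis : List (List Bool)} (hs : pvShape grid cols vis)
    (hP : ∀ x, pvInR grid cols x → (pvGetV vis x.1 x.2 = true ↔ P x))
    (queue : List (Int × Int)) (q : Int × Int) :
    ∃ L W,
      ([((-1 : Int), (0 : Int)), (1, 0), (0, -1), (0, 1)].foldl
        (fun (st : List (Int × Int) × List (List Bool)) d =>
          let nr := q.1 + d.1
          let nc := q.2 + d.2
          if 0 ≤ nr ∧ nr < rows ∧ 0 ≤ nc ∧ nc < cols ∧ ¬ (pvGetV st.2 nr nc = true) ∧
              pvGetI grid nr nc = color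
          then (st.1 ++ [(nr, nc)], pvSetV st.2 nr nc) else st) (queue, vis)) = (queue ++ L, W) ∧
      pvShape grid cols W ∧
      (∀ x, pvInR grid cols x → (pvGetV W x.1 x.2 = true ↔ P x ∨ x ∈ L)) ∧
      (∀ x, x ∈ L ↔ (pvAdj q x ∧ pvInR grid cols x ∧ pvG grid cols x.1 x.2 = color ∧ ¬ P x)) ∧
      L.Nodup := by
  obtain ⟨L1, W1, e1, s1, c1, m1, l1⟩ := pvStepOne hrows hs hP queue (q.1 + -1) (q.2 + 0)
  obtain ⟨L2, W2, e2, s2, c2, m2, l2⟩ :=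
    pvStepOne (P := fun x => P x ∨ x ∈ L1) hrows s1 c1 (queue ++ L1) (q.1 + 1) (q.2 + 0)
  obtain ⟨L3, W3, e3, s3, c3, m3, l3⟩ :=
    pvStepOne (P := fun x => (P x ∨ x ∈ L1) ∨ x ∈ L2) hrows s2 c2 ((queue ++ L1) ++ L2)
      (q.1 + 0) (q.2 + -1)
  obtain ⟨L4, W4, e4, s4, c4, m4, l4⟩ :=
    pvStepOne (P := fun x => ((P x ∨ x ∈ L1) ∨ x ∈ L2) ∨ x ∈ L3) hrows s3 c3
      (((queue ++ L1) ++ L2) ++ L3) (q.1 + 0) (q.2 + 1)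
  refine ⟨L1 ++ L2 ++ L3 ++ L4, W4, ?_, s4, ?_, ?_, ?_⟩
  · simp only [List.foldl_cons, List.foldl_nil]
    rw [e1]
    dsimp only
    rw [e2]
    dsimp only
    rw [e3]
    dsimp only
    rw [e4]
    simp [List.append_assoc]
  · intro x hx
    rw [c4 x hx]
    simp only [List.mem_append]
    tauto
  · intro x
    simp only [List.mem_append]
    constructor
    · rintro (((h | h) | h) | h)
      · obtain ⟨he, hin, hg, hnp⟩ := m1 x |>.mp h
        exact ⟨adj_iff.mpr (Or.inl he), hin, hg, hnp⟩
      · obtain ⟨he, hin, hg, hnp⟩ := m2 x |>.mp h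
        exact ⟨adj_iff.mpr (Or.inr (Or.inl he)), hin, hg, fun hp => hnp (Or.inl hp)⟩
      · obtain ⟨he, hin, hg, hnp⟩ := m3 x |>.mp h
        exact ⟨adj_iff.mpr (Or.inr (Or.inr (Or.inl he))), hin, hg,
          fun hp => hnp (Or.inl (Or.inl hp))⟩
      · obtain ⟨he, hin, hg, hnp⟩ := m4 x |>.mp h
        exact ⟨adj_iff.mpr (Or.inr (Or.inr (Or.inr he))), hin, hg,
          fun hp => hnp (Or.inl (Or.inl (Or.inl hp)))⟩
    · rintro ⟨hadj, hin, hg, hnp⟩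
      rcases adj_iff.mp hadj with he | he | he | he
      · exact Or.inl (Or.inl (Or.inl ((m1 x).mpr ⟨he, hin, hg, hnp⟩)))
      · refine Or.inl (Or.inl (Or.inr ((m2 x).mpr ⟨he, hin, hg, ?_⟩)))
        rintro (hp | hL)
        · exact hnp hp
        · have := ((m1 x).mp hL).1
          rw [he] at this
          simp [Prod.ext_iff] at this
      · refine Or.inl (Or.inr ((m3 x).mpr ⟨he, hin, hg, ?_⟩))
        rintro ((hp | hL) | hL)
        · exact hnp hp
        · have := ((m1 x).mp hL).1
          rw [he] at this; simp [Prod.ext_iff] at this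
        · have := ((m2 x).mp hL).1
          rw [he] at this; simp [Prod.ext_iff] at this
      · refine Or.inr ((m4 x).mpr ⟨he, hin, hg, ?_⟩)
        rintro (((hp | hL) | hL) | hL)
        · exact hnp hp
        · have := ((m1 x).mp hL).1
          rw [he] at this; simp [Prod.ext_iff] at this
        · have := ((m2 x).mp hL).1
          rw [he] at this; simp [Prod.ext_iff] at this
        · have := ((m3 x).mp hL).1
          rw [he] at this; simp [Prod.ext_iff] at this
  · have h1 := len_le_one_cases (fun x hx => ((m1 x).mp hx).1) l1
    have h2 := len_le_one_cases (fun x hx => ((m2 x).mp hx).1) l2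
    have h3 := len_le_one_cases (fun x hx => ((m3 x).mp hx).1) l3
    have h4 := len_le_one_cases (fun x hx => ((m4 x).mp hx).1) l4
    rcases h1 with h1 | h1 <;> rcases h2 with h2 | h2 <;> rcases h3 with h3 | h3 <;>
      rcases h4 with h4 | h4 <;> subst h1 <;> subst h2 <;> subst h3 <;> subst h4 <;>
      simp [Prod.ext_iff]

-- ---------- the flood fill collects exactly the cells of its color ----------
theorem bfs_complete {grid : List (List Int)} {cols : Int}
    (hcons : pvColorOK grid cols = true) {r0 c0 color : Int}
    (h0 : pvG grid cols r0 c0 = color) (hc0 : color ≠ 0) {cells : List (Int × Int)}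
    (hmem : ∀ x ∈ cells, x ∈ pvCellsOf grid cols color)
    (hself : (r0, c0) ∈ cells)
    (hclosure : ∀ y ∈ pvCellsOf grid cols color, (∃ x ∈ cells, pvAdj x y) → y ∈ cells) :
    ∀ x, x ∈ cells ↔ x ∈ pvCellsOf grid cols color := by
  have hrc : (r0, c0) ∈ pvCellsOf grid cols color :=
    mem_cellsOf.mpr ⟨pvG_inR (by rw [h0]; exact hc0), h0⟩
  have hB : ∀ z ∈ pvCellsOf grid cols color, (z.1 = r0 ∨ z.2 = c0) → z ∈ cells := by
    intro z hz he
    obtain ⟨hch1, hch2, _⟩ := colorOK_pair hcons hc0 hz hrc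
    by_cases hze : z = (r0, c0)
    · rw [hze]; exact hself
    · refine hclosure z hz ⟨(r0, c0), hself, ?_⟩
      have : ¬ (z.1 = r0 ∧ z.2 = c0) := by
        intro ⟨u, w⟩; exact hze (Prod.ext u w)
      rcases he with he | he
      · exact Or.inl ⟨he.symm, by omega⟩
      · exact Or.inr ⟨he.symm, by omega⟩
  intro y
  refine ⟨hmem y, ?_⟩
  intro hy
  obtain ⟨hch1, hch2, hconn⟩ := colorOK_pair hcons hc0 hy hrc
  rcases hconn with h | h | h | h
  · exact hB y hy (Or.inl h)
  · exact hB y hy (Or.inr h)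
  · -- common neighbour z = (y.1, c0) has the color
    by_cases he2 : y.2 = c0
    · exact hB y hy (Or.inr he2)
    have hzM : (y.1, c0) ∈ pvCellsOf grid cols color :=
      mem_cellsOf.mpr ⟨pvG_inR (by rw [h]; exact hc0), h⟩
    have hzc : (y.1, c0) ∈ cells := hB _ hzM (Or.inr rfl)
    refine hclosure y hy ⟨(y.1, c0), hzc, ?_⟩
    exact Or.inl ⟨rfl, by dsimp only; omega⟩
  · -- common neighbour z = (r0, y.2) has the color
    by_cases he1 : y.1 = r0
    · exact hB y hy (Or.inl he1)
    have hzM : (r0, y.2) ∈ pvCellsOf grid cols color :=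
      mem_cellsOf.mpr ⟨pvG_inR (by rw [h]; exact hc0), h⟩
    have hzc : (r0, y.2) ∈ cells := hB _ hzM (Or.inl rfl)
    refine hclosure y hy ⟨(r0, y.2), hzc, ?_⟩
    exact Or.inr ⟨rfl, by dsimp only; omega⟩

theorem bfs_spec {grid : List (List Int)} {cols : Int}
    (hcons : pvColorOK grid cols = true) {r0 c0 color : Int}
    (h0 : pvG grid cols r0 c0 = color) (hc0 : color ≠ 0)
    (vis0 : List (List Bool))
    (hfresh : ∀ x ∈ pvCellsOf grid cols color, pvGetV vis0 x.1 x.2 = false) :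
    ∀ (fuel : Nat) (queue cells : List (Int × Int)) (vis : List (List Bool)),
      pvShape grid cols vis →
      (∀ x, pvInR grid cols x →
        (pvGetV vis x.1 x.2 = true ↔ (pvGetV vis0 x.1 x.2 = true ∨ x ∈ cells ++ queue))) →
      (cells ++ queue).Nodup →
      (∀ x ∈ cells ++ queue, x ∈ pvCellsOf grid cols color) →
      (r0, c0) ∈ cells ++ queue →
      (∀ y ∈ pvCellsOf grid cols color, (∃ x ∈ cells, pvAdj x y) → y ∈ cells ++ queue) →
      queue.length + ((pvCellsOf grid cols color).length - (cells ++ queue).length) ≤ fuel →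
      ((∀ x, x ∈ (pvBfs grid (grid.length : Int) cols color fuel queue cells vis).1 ↔
          x ∈ pvCellsOf grid cols color) ∧
        pvShape grid cols (pvBfs grid (grid.length : Int) cols color fuel queue cells vis).2 ∧
        (∀ x, pvInR grid cols x →
          (pvGetV (pvBfs grid (grid.length : Int) cols color fuel queue cells vis).2 x.1 x.2 = true ↔
            (pvGetV vis0 x.1 x.2 = true ∨ x ∈ pvCellsOf grid cols color)))) := by
  intro fuel
  induction fuel with
  | zero =>
    intro queue cells vis hshape hchar hnodup hmem hself hclosure hfuel
    have hq : queue = [] := by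
      cases queue with
      | nil => rfl
      | cons a t => simp at hfuel
    subst hq
    simp only [pvBfs]
    simp only [List.append_nil] at hchar hnodup hmem hself hclosure
    have hcomp := bfs_complete hcons h0 hc0 hmem hself hclosure
    refine ⟨hcomp, hshape, ?_⟩
    intro x hx
    rw [hchar x hx, hcomp x]
  | succ fuel ih =>
    intro queue cells vis hshape hchar hnodup hmem hself hclosure hfuel
    cases queue with
    | nil =>
      simp only [pvBfs]
      simp only [List.append_nil] at hchar hnodup hmem hself hclosure
      have hcomp := bfs_complete hcons h0 hc0 hmem hself hclosure
      refine ⟨hcomp, hshape, ?_⟩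
      intro x hx
      rw [hchar x hx, hcomp x]
    | cons q queue =>
      obtain ⟨L, W, e, sW, cW, mW, ndL⟩ :=
        bfs_round (color := color)
          (P := fun x => pvGetV vis0 x.1 x.2 = true ∨ x ∈ cells ++ q :: queue)
          rfl hshape hchar queue q
      simp only [pvBfs]
      rw [e]
      have hLM : ∀ x ∈ L, x ∈ pvCellsOf grid cols color := by
        intro x hxL
        obtain ⟨hadj, hin, hg, hnp⟩ := (mW x).mp hxL
        exact mem_cellsOf.mpr ⟨hin, hg⟩
      have hLfresh : ∀ x ∈ L, ¬ (pvGetV vis0 x.1 x.2 = true ∨ x ∈ cells ++ q :: queue) :=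
        fun x hxL => ((mW x).mp hxL).2.2.2
      have hassoc : (cells ++ [(q.1, q.2)]) ++ (queue ++ L) = (cells ++ q :: queue) ++ L := by
        simp
      have hnodup' : ((cells ++ q :: queue) ++ L).Nodup := by
        rw [List.nodup_append]
        refine ⟨hnodup, ndL, ?_⟩
        intro a ha b hb hab
        subst hab
        exact (hLfresh a hb) (Or.inr ha)
      have hmem' : ∀ x ∈ (cells ++ q :: queue) ++ L, x ∈ pvCellsOf grid cols color := by
        intro x hx
        rcases List.mem_append.mp hx with h | h
        · exact hmem x h
        · exact hLM x h
      refine ih (queue ++ L) (cells ++ [(q.1, q.2)]) W sW ?_ ?_ ?_ ?_ ?_ ?_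
      · intro x hx
        rw [cW x hx, hassoc]
        simp only [List.mem_append]
        tauto
      · rw [hassoc]; exact hnodup'
      · rw [hassoc]; exact hmem'
      · rw [hassoc]
        exact List.mem_append.mpr (Or.inl hself)
      · rw [hassoc]
        intro y hyM ⟨x, hx, hadj⟩
        rcases List.mem_append.mp hx with hxc | hxq
        · exact List.mem_append.mpr (Or.inl (hclosure y hyM ⟨x, hxc, hadj⟩))
        · simp only [List.mem_singleton] at hxq
          subst hxq
          by_cases hyin : y ∈ cells ++ q :: queue
          · exact List.mem_append.mpr (Or.inl hyin)
          · refine List.mem_append.mpr (Or.inr ?_)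
            rw [mW y]
            refine ⟨by rwa [Prod.mk.eta] at hadj, (mem_cellsOf.mp hyM).1,
              (mem_cellsOf.mp hyM).2, ?_⟩
            rintro (hvis | hmem2)
            · rw [hfresh y hyM] at hvis; cases hvis
            · exact hyin hmem2
      · have hlen : ((cells ++ q :: queue) ++ L).length ≤ (pvCellsOf grid cols color).length :=
          List.Subperm.length_le (List.subperm_of_subset hnodup' hmem')
        simp only [List.length_append, List.length_cons, List.length_nil] at hfuel hlen ⊢
        omega

-- ---------- 2x2 pattern and assembly ----------
theorem min_int {l : List Int} {a : Int} (hlb : ∀ x ∈ l, a ≤ x) (hatt : a ∈ l) :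
    (PySem.List.min? l (fun x => x)).getD 0 = a := by
  rcases hm : PySem.List.min? l (fun x => x) with _ | m
  · rw [PySem.List.min?_eq_none_iff] at hm
    rw [hm] at hatt; cases hatt
  · have h1 : m ∈ l := PySem.List.min?_mem hm
    have h2 := PySem.List.min?_isMin hm a hatt
    have h3 := hlb m h1
    simp only [Option.getD_some]
    omega

theorem pvSet2_lit00 {a b c d v : Int} : pvSet2 [[a, b], [c, d]] 0 0 v = [[v, b], [c, d]] := rfl
theorem pvSet2_lit01 {a b c d v : Int} : pvSet2 [[a, b], [c, d]] 0 1 v = [[a, v], [c, d]] := rfl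
theorem pvSet2_lit10 {a b c d v : Int} : pvSet2 [[a, b], [c, d]] 1 0 v = [[a, b], [v, d]] := rfl
theorem pvSet2_lit11 {a b c d v : Int} : pvSet2 [[a, b], [c, d]] 1 1 v = [[a, b], [c, v]] := rfl

theorem pattern_fold {a1 a2 color : Int} :
    ∀ (cells : List (Int × Int)) (p00 p01 p10 p11 : Int),
      (∀ x ∈ cells, (x.1 = a1 ∨ x.1 = a1 + 1) ∧ (x.2 = a2 ∨ x.2 = a2 + 1)) →
      cells.foldl (fun p rc => pvSet2 p (rc.1 - a1) (rc.2 - a2) color) [[p00, p01], [p10, p11]] =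
        [[if (a1, a2) ∈ cells then color else p00,
          if (a1, a2 + 1) ∈ cells then color else p01],
         [if (a1 + 1, a2) ∈ cells then color else p10,
          if (a1 + 1, a2 + 1) ∈ cells then color else p11]] := by
  intro cells
  induction cells with
  | nil => intro p00 p01 p10 p11 _; simp
  | cons x t ih =>
    intro p00 p01 p10 p11 hbox
    obtain ⟨hx1, hx2⟩ := hbox x (by simp)
    have hbt : ∀ y ∈ t, (y.1 = a1 ∨ y.1 = a1 + 1) ∧ (y.2 = a2 ∨ y.2 = a2 + 1) :=
      fun y hy => hbox y (by simp [hy])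
    simp only [List.foldl_cons]
    rcases hx1 with h1 | h1 <;> rcases hx2 with h2 | h2
    · have hxe : x = (a1, a2) := Prod.ext h1 h2
      subst hxe
      rw [show a1 - a1 = (0 : Int) by ring, show a2 - a2 = (0 : Int) by ring, pvSet2_lit00,
        ih color p01 p10 p11 hbt]
      simp [List.mem_cons, Prod.mk.injEq]
    · have hxe : x = (a1, a2 + 1) := Prod.ext h1 h2
      subst hxe
      rw [show a1 - a1 = (0 : Int) by ring, show a2 + 1 - a2 = (1 : Int) by ring, pvSet2_lit01,
        ih p00 color p10 p11 hbt]
      simp [List.mem_cons, Prod.mk.injEq]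
    · have hxe : x = (a1 + 1, a2) := Prod.ext h1 h2
      subst hxe
      rw [show a1 + 1 - a1 = (1 : Int) by ring, show a2 - a2 = (0 : Int) by ring, pvSet2_lit10,
        ih p00 p01 color p11 hbt]
      simp [List.mem_cons, Prod.mk.injEq]
    · have hxe : x = (a1 + 1, a2 + 1) := Prod.ext h1 h2
      subst hxe
      rw [show a1 + 1 - a1 = (1 : Int) by ring, show a2 + 1 - a2 = (1 : Int) by ring, pvSet2_lit11,
        ih p00 p01 p10 color hbt]
      simp [List.mem_cons, Prod.mk.injEq]

theorem writeQ00 {x0 x1 x2 x3 x4 x5 x6 x7 x8 x9 x10 x11 x12 x13 x14 x15 : Int}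
    {p : List (List Int)} :
    pvWriteQ [[x0,x1,x2,x3],[x4,x5,x6,x7],[x8,x9,x10,x11],[x12,x13,x14,x15]] p 0 0 =
      [[pvGetI p 0 0, pvGetI p 0 1, x2, x3], [pvGetI p 1 0, pvGetI p 1 1, x6, x7],
        [x8,x9,x10,x11],[x12,x13,x14,x15]] := rfl

theorem writeQ02 {x0 x1 x2 x3 x4 x5 x6 x7 x8 x9 x10 x11 x12 x13 x14 x15 : Int}
    {p : List (List Int)} :
    pvWriteQ [[x0,x1,x2,x3],[x4,x5,x6,x7],[x8,x9,x10,x11],[x12,x13,x14,x15]] p 0 2 =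
      [[x0, x1, pvGetI p 0 0, pvGetI p 0 1], [x4, x5, pvGetI p 1 0, pvGetI p 1 1],
        [x8,x9,x10,x11],[x12,x13,x14,x15]] := rfl

theorem writeQ20 {x0 x1 x2 x3 x4 x5 x6 x7 x8 x9 x10 x11 x12 x13 x14 x15 : Int}
    {p : List (List Int)} :
    pvWriteQ [[x0,x1,x2,x3],[x4,x5,x6,x7],[x8,x9,x10,x11],[x12,x13,x14,x15]] p 2 0 =
      [[x0,x1,x2,x3],[x4,x5,x6,x7],
        [pvGetI p 0 0, pvGetI p 0 1, x10, x11], [pvGetI p 1 0, pvGetI p 1 1, x14, x15]] := rfl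

theorem writeQ22 {x0 x1 x2 x3 x4 x5 x6 x7 x8 x9 x10 x11 x12 x13 x14 x15 : Int}
    {p : List (List Int)} :
    pvWriteQ [[x0,x1,x2,x3],[x4,x5,x6,x7],[x8,x9,x10,x11],[x12,x13,x14,x15]] p 2 2 =
      [[x0,x1,x2,x3],[x4,x5,x6,x7],
        [x8, x9, pvGetI p 0 0, pvGetI p 0 1], [x12, x13, pvGetI p 1 0, pvGetI p 1 1]] := rfl

-- A's corner dictionary, eliminated: classify-then-assemble is a per-piece direct write
theorem assemble_classify (d : PySem.Dict String (Int × List (List Int)))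
    (piece : Int × List (Int × Int)) :
    pvAssemble (pvClassify d piece) = pvPieceB (pvAssemble d) piece := by
  unfold pvClassify pvPieceB
  dsimp only
  set pattern := piece.2.foldl
    (fun p rc => pvSet2 p (rc.1 - (PySem.List.min? (piece.2.map Prod.fst) (fun x => x)).getD 0)
      (rc.2 - (PySem.List.min? (piece.2.map Prod.snd) (fun x => x)).getD 0) piece.1)
    [[0, 0], [0, 0]] with hpat
  have hTLBR : ("TL" : String) ≠ "BR" := by decide
  have hTRBR : ("TR" : String) ≠ "BR" := by decide
  have hBLBR : ("BL" : String) ≠ "BR" := by decide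
  have hTLBL : ("TL" : String) ≠ "BL" := by decide
  have hTRBL : ("TR" : String) ≠ "BL" := by decide
  have hBRBL : ("BR" : String) ≠ "BL" := by decide
  have hTLTR : ("TL" : String) ≠ "TR" := by decide
  have hBLTR : ("BL" : String) ≠ "TR" := by decide
  have hBRTR : ("BR" : String) ≠ "TR" := by decide
  have hTRTL : ("TR" : String) ≠ "TL" := by decide
  have hBLTL : ("BL" : String) ≠ "TL" := by decide
  have hBRTL : ("BR" : String) ≠ "TL" := by decide
  split_ifs with h00 h01 h10 h11
  · unfold pvAssemble
    rw [PySem.Dict.get?_insert_of_ne _ _ hTLBR, PySem.Dict.get?_insert_of_ne _ _ hTRBR,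
      PySem.Dict.get?_insert_of_ne _ _ hBLBR, PySem.Dict.get?_insert_self]
    rcases d.get? "TL" with _ | pTL <;> rcases d.get? "TR" with _ | pTR <;>
      rcases d.get? "BL" with _ | pBL <;> rcases d.get? "BR" with _ | pBR <;>
      simp only [writeQ00, writeQ02, writeQ20, writeQ22, List.replicate]
  · unfold pvAssemble
    rw [PySem.Dict.get?_insert_of_ne _ _ hTLBL, PySem.Dict.get?_insert_of_ne _ _ hTRBL,
      PySem.Dict.get?_insert_self, PySem.Dict.get?_insert_of_ne _ _ hBRBL]
    rcases d.get? "TL" with _ | pTL <;> rcases d.get? "TR" with _ | pTR <;>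
      rcases d.get? "BL" with _ | pBL <;> rcases d.get? "BR" with _ | pBR <;>
      simp only [writeQ00, writeQ02, writeQ20, writeQ22, List.replicate]
  · unfold pvAssemble
    rw [PySem.Dict.get?_insert_of_ne _ _ hTLTR, PySem.Dict.get?_insert_self,
      PySem.Dict.get?_insert_of_ne _ _ hBLTR, PySem.Dict.get?_insert_of_ne _ _ hBRTR]
    rcases d.get? "TL" with _ | pTL <;> rcases d.get? "TR" with _ | pTR <;>
      rcases d.get? "BL" with _ | pBL <;> rcases d.get? "BR" with _ | pBR <;>
      simp only [writeQ00, writeQ02, writeQ20, writeQ22, List.replicate]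
  · unfold pvAssemble
    rw [PySem.Dict.get?_insert_self, PySem.Dict.get?_insert_of_ne _ _ hTRTL,
      PySem.Dict.get?_insert_of_ne _ _ hBLTL, PySem.Dict.get?_insert_of_ne _ _ hBRTL]
    rcases d.get? "TL" with _ | pTL <;> rcases d.get? "TR" with _ | pTR <;>
      rcases d.get? "BL" with _ | pBL <;> rcases d.get? "BR" with _ | pBR <;>
      simp only [writeQ00, writeQ02, writeQ20, writeQ22, List.replicate]
  · rfl

theorem assemble_foldl (pieces : List (Int × List (Int × Int)))
    (d : PySem.Dict String (Int × List (List Int))) :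
    pvAssemble (pieces.foldl pvClassify d) = pieces.foldl pvPieceB (pvAssemble d) := by
  induction pieces generalizing d with
  | nil => rfl
  | cons p t ih =>
    simp only [List.foldl_cons]
    rw [ih, assemble_classify]

-- the per-piece write only depends on the SET of cells of the piece
theorem pieceB_congr {grid : List (List Int)} {cols : Int}
    (hcons : pvColorOK grid cols = true) {v : Int} (hv : v ≠ 0) {C : List (Int × Int)}
    (hset : ∀ x, x ∈ C ↔ x ∈ pvCellsOf grid cols v)
    (hne : pvCellsOf grid cols v ≠ []) (o : List (List Int)) :
    pvPieceB o (v, C) = pvPieceB o (v, pvCellsOf grid cols v) := by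
  obtain ⟨w0, hw0⟩ := List.exists_mem_of_ne_nil _ hne
  -- the row minimum a and column minimum b of the cells
  obtain ⟨a, haD⟩ : ∃ a, (PySem.List.min? ((pvCellsOf grid cols v).map Prod.fst)
      (fun x => x)).getD 0 = a := ⟨_, rfl⟩
  obtain ⟨b, hbD⟩ : ∃ b, (PySem.List.min? ((pvCellsOf grid cols v).map Prod.snd)
      (fun x => x)).getD 0 = b := ⟨_, rfl⟩
  have hmap_ne : (pvCellsOf grid cols v).map Prod.fst ≠ [] := by
    simp [List.map_eq_nil_iff, hne]
  have hamem : a ∈ (pvCellsOf grid cols v).map Prod.fst := by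
    rcases hm : PySem.List.min? ((pvCellsOf grid cols v).map Prod.fst) (fun x => x) with _ | m
    · exact absurd ((PySem.List.min?_eq_none_iff _ _).mp hm) hmap_ne
    · have := PySem.List.min?_mem hm
      rw [hm] at haD
      simp only [Option.getD_some] at haD
      rwa [haD] at this
  have halb : ∀ y ∈ (pvCellsOf grid cols v).map Prod.fst, a ≤ y := by
    rcases hm : PySem.List.min? ((pvCellsOf grid cols v).map Prod.fst) (fun x => x) with _ | m
    · exact absurd ((PySem.List.min?_eq_none_iff _ _).mp hm) hmap_ne
    · have := PySem.List.min?_isMin hm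
      rw [hm] at haD
      simp only [Option.getD_some] at haD
      rw [← haD]
      exact this
  have hmap_ne2 : (pvCellsOf grid cols v).map Prod.snd ≠ [] := by
    simp [List.map_eq_nil_iff, hne]
  have hbmem : b ∈ (pvCellsOf grid cols v).map Prod.snd := by
    rcases hm : PySem.List.min? ((pvCellsOf grid cols v).map Prod.snd) (fun x => x) with _ | m
    · exact absurd ((PySem.List.min?_eq_none_iff _ _).mp hm) hmap_ne2
    · have := PySem.List.min?_mem hm
      rw [hm] at hbD
      simp only [Option.getD_some] at hbD
      rwa [hbD] at this
  have hblb : ∀ y ∈ (pvCellsOf grid cols v).map Prod.snd, b ≤ y := by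
    rcases hm : PySem.List.min? ((pvCellsOf grid cols v).map Prod.snd) (fun x => x) with _ | m
    · exact absurd ((PySem.List.min?_eq_none_iff _ _).mp hm) hmap_ne2
    · have := PySem.List.min?_isMin hm
      rw [hm] at hbD
      simp only [Option.getD_some] at hbD
      rw [← hbD]
      exact this
  obtain ⟨wa, hwaM, hwa⟩ := List.mem_map.mp hamem
  obtain ⟨wb, hwbM, hwb⟩ := List.mem_map.mp hbmem
  -- every cell lies in the 2x2 box with top-left (a, b)
  have hbox : ∀ x ∈ pvCellsOf grid cols v,
      (x.1 = a ∨ x.1 = a + 1) ∧ (x.2 = b ∨ x.2 = b + 1) := by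
    intro x hx
    have hla := halb x.1 (List.mem_map.mpr ⟨x, hx, rfl⟩)
    have hlb := hblb x.2 (List.mem_map.mpr ⟨x, hx, rfl⟩)
    obtain ⟨hc1, _, _⟩ := colorOK_pair hcons hv hx hwaM
    obtain ⟨_, hc2, _⟩ := colorOK_pair hcons hv hx hwbM
    constructor <;> omega
  have hboxC : ∀ x ∈ C, (x.1 = a ∨ x.1 = a + 1) ∧ (x.2 = b ∨ x.2 = b + 1) :=
    fun x hx => hbox x ((hset x).mp hx)
  have haC : (PySem.List.min? (C.map Prod.fst) (fun x => x)).getD 0 = a := by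
    apply min_int
    · intro y hy
      obtain ⟨x, hx, rfl⟩ := List.mem_map.mp hy
      exact halb x.1 (List.mem_map.mpr ⟨x, (hset x).mp hx, rfl⟩)
    · exact List.mem_map.mpr ⟨wa, (hset wa).mpr hwaM, hwa⟩
  have hbC : (PySem.List.min? (C.map Prod.snd) (fun x => x)).getD 0 = b := by
    apply min_int
    · intro y hy
      obtain ⟨x, hx, rfl⟩ := List.mem_map.mp hy
      exact hblb x.2 (List.mem_map.mpr ⟨x, (hset x).mp hx, rfl⟩)
    · exact List.mem_map.mpr ⟨wb, (hset wb).mpr hwbM, hwb⟩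
  have h00 : ((a, b) ∈ C) ↔ ((a, b) ∈ pvCellsOf grid cols v) := hset _
  have h01 : ((a, b + 1) ∈ C) ↔ ((a, b + 1) ∈ pvCellsOf grid cols v) := hset _
  have h10 : ((a + 1, b) ∈ C) ↔ ((a + 1, b) ∈ pvCellsOf grid cols v) := hset _
  have h11 : ((a + 1, b + 1) ∈ C) ↔ ((a + 1, b + 1) ∈ pvCellsOf grid cols v) := hset _
  unfold pvPieceB
  dsimp only
  rw [haC, hbC, haD, hbD, pattern_fold C 0 0 0 0 hboxC,
    pattern_fold (pvCellsOf grid cols v) 0 0 0 0 hbox]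
  rw [if_congr h00 rfl rfl, if_congr h01 rfl rfl, if_congr h10 rfl rfl, if_congr h11 rfl rfl]

-- a piece fold only depends on the colors and the cell sets
theorem foldl_pieceB_congr {grid : List (List Int)} {cols : Int}
    (hcons : pvColorOK grid cols = true) :
    ∀ (pieces : List (Int × List (Int × Int))) (o : List (List Int)),
      (∀ p ∈ pieces, p.1 ≠ 0 ∧ pvCellsOf grid cols p.1 ≠ [] ∧
        (∀ x, x ∈ p.2 ↔ x ∈ pvCellsOf grid cols p.1)) →
      pieces.foldl pvPieceB o =
        ((pieces.map Prod.fst).map (fun v => (v, pvCellsOf grid cols v))).foldl pvPieceB o := by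
  intro pieces
  induction pieces with
  | nil => intro o _; rfl
  | cons p t ih =>
    intro o hp
    obtain ⟨hv, hne, hset⟩ := hp p (by simp)
    simp only [List.map_cons, List.foldl_cons]
    rw [show pvPieceB o p = pvPieceB o (p.1, p.2) by rw [Prod.mk.eta],
      pieceB_congr hcons hv hset hne o]
    exact ih _ (fun q hq => hp q (by simp [hq]))

-- ---------- row-major filters ----------
theorem rmlt_succ_iff {m : Int × Int} {r c : Int} :
    pvRmLt m (r, c + 1) ↔ (pvRmLt m (r, c) ∨ m = (r, c)) := by
  obtain ⟨m1, m2⟩ := m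
  simp only [pvRmLt, Prod.mk.injEq]
  omega

theorem filter_rmlt_succ {l : List (Int × Int)} (hp : l.Pairwise pvRmLt) (r c : Int) :
    l.filter (fun m => decide (pvRmLt m (r, c + 1)))
      = l.filter (fun m => decide (pvRmLt m (r, c)))
        ++ (if (r, c) ∈ l then [(r, c)] else []) := by
  induction l with
  | nil => simp
  | cons a t ih =>
    have ha := (List.pairwise_cons.mp hp).1
    have iht := ih (List.pairwise_cons.mp hp).2
    by_cases h2 : a = (r, c)
    · have h1 : ¬ pvRmLt a (r, c) := by
        rw [h2]; unfold pvRmLt; dsimp only; omega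
      have hnil1 : t.filter (fun m => decide (pvRmLt m (r, c + 1))) = [] := by
        rw [List.filter_eq_nil_iff]
        intro b hb
        have := ha b hb
        rw [h2] at this
        obtain ⟨b1, b2⟩ := b
        simp only [pvRmLt] at this ⊢
        simp only [decide_eq_true_eq]
        omega
      have hnil2 : t.filter (fun m => decide (pvRmLt m (r, c))) = [] := by
        rw [List.filter_eq_nil_iff]
        intro b hb
        have := ha b hb
        rw [h2] at this
        obtain ⟨b1, b2⟩ := b
        simp only [pvRmLt] at this ⊢
        simp only [decide_eq_true_eq]
        omega
      rw [List.filter_cons_of_pos (by rw [h2]; simp [pvRmLt]),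
        List.filter_cons_of_neg (by simpa using h1), hnil1, hnil2,
        if_pos (by rw [← h2]; exact List.mem_cons_self), h2]
      simp
    · by_cases h1 : pvRmLt a (r, c)
      · rw [List.filter_cons_of_pos (by simp only [decide_eq_true_eq, rmlt_succ_iff]; tauto),
          List.filter_cons_of_pos (by simpa using h1), iht]
        have hmem : ((r, c) ∈ a :: t) = ((r, c) ∈ t) := by
          simp only [List.mem_cons, eq_comm (a := (r, c)) (b := a), h2, false_or]
        rw [if_congr (iff_of_eq hmem) rfl rfl]
        simp [List.cons_append]
      · have h3 : ¬ pvRmLt a (r, c + 1) := by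
          intro hx
          rcases rmlt_succ_iff.mp hx with h | h
          · exact h1 h
          · exact h2 h
        rw [List.filter_cons_of_neg (by simpa using h3),
          List.filter_cons_of_neg (by simpa using h1), iht]
        have hmem : ((r, c) ∈ a :: t) = ((r, c) ∈ t) := by
          simp only [List.mem_cons, eq_comm (a := (r, c)) (b := a), h2, false_or]
        rw [if_congr (iff_of_eq hmem) rfl rfl]

-- ---------- the joint row-major scan ----------
-- joint invariant after scanning all cells row-major-before pos: A's visited matrix and piece
-- list, and B's color dictionary
def pvInv (grid : List (List Int)) (cols : Int) (pos : Int × Int)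
    (vis : List (List Bool)) (pieces : List (Int × List (Int × Int)))
    (d : PySem.Dict Int (List (Int × Int))) : Prop :=
  pvShape grid cols vis ∧
  (∀ x, pvInR grid cols x → (pvGetV vis x.1 x.2 = true ↔
    (pvG grid cols x.1 x.2 ≠ 0 ∧ ∃ m,
      (pvCellsOf grid cols (pvG grid cols x.1 x.2)).head? = some m ∧ pvRmLt m pos))) ∧
  d.keys = pieces.map Prod.fst ∧
  d.keys.Nodup ∧
  (∀ v : Int, v ∈ d.keys ↔ (v ≠ 0 ∧ ∃ m,
    (pvCellsOf grid cols v).head? = some m ∧ pvRmLt m pos)) ∧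
  (∀ v : Int, v ≠ 0 → d.getD v [] =
    (pvCellsOf grid cols v).filter (fun m => decide (pvRmLt m pos))) ∧
  (∀ p ∈ pieces, p.1 ≠ 0 ∧ pvCellsOf grid cols p.1 ≠ [] ∧
    (∀ x, x ∈ p.2 ↔ x ∈ pvCellsOf grid cols p.1))

theorem scan_cell {grid : List (List Int)} {cols : Int}
    (hcons : pvColorOK grid cols = true) {r c : Int}
    (hrc : pvInR grid cols (r, c))
    {vis : List (List Bool)} {pieces : List (Int × List (Int × Int))}
    {d : PySem.Dict Int (List (Int × Int))}
    (hinv : pvInv grid cols (r, c) vis pieces d) :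
    pvInv grid cols (r, c + 1)
      (pvScanCell grid (grid.length : Int) cols (vis, pieces) r c).1
      (pvScanCell grid (grid.length : Int) cols (vis, pieces) r c).2
      (pvStepB grid d r c) := by
  obtain ⟨hsh, hvc, hkeys, hnd, hkc, hgd, hpc⟩ := hinv
  -- heads of other colors are never the current cell
  have hm_ne : ∀ w : Int, w ≠ pvG grid cols r c → ∀ m, (pvCellsOf grid cols w).head? = some m →
      m ≠ (r, c) := by
    intro w hw m hm he
    subst he
    exact hw ((mem_cellsOf.mp (List.mem_of_mem_head? hm)).2).symm
  have hsucc_other : ∀ w : Int, w ≠ pvG grid cols r c →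
      ((∃ m, (pvCellsOf grid cols w).head? = some m ∧ pvRmLt m (r, c + 1)) ↔
       (∃ m, (pvCellsOf grid cols w).head? = some m ∧ pvRmLt m (r, c))) := by
    intro w hw
    constructor
    · rintro ⟨m, hm, hlt⟩
      rcases rmlt_succ_iff.mp hlt with h | h
      · exact ⟨m, hm, h⟩
      · exact absurd h (hm_ne w hw m hm)
    · rintro ⟨m, hm, hlt⟩
      exact ⟨m, hm, rmlt_succ_iff.mpr (Or.inl hlt)⟩
  by_cases hg : pvG grid cols r c = 0
  · -- empty cell: A and B both skip
    have hgi : pvGetI grid r c = 0 := by rw [← pvG_eq_pvGetI hrc]; exact hg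
    have hA : pvScanCell grid (grid.length : Int) cols (vis, pieces) r c = (vis, pieces) := by
      simp [pvScanCell, hgi]
    have hB : pvStepB grid d r c = d := by
      simp [pvStepB, hgi]
    rw [hA, hB]
    refine ⟨hsh, ?_, hkeys, hnd, ?_, ?_, hpc⟩
    · intro x hx
      rw [hvc x hx]
      refine and_congr_right fun hgx => ?_
      exact (hsucc_other _ (fun he => hgx (he.trans hg))).symm
    · intro w
      rw [hkc w]
      refine and_congr_right fun hw => ?_
      exact (hsucc_other w (fun he => hw (he.trans hg))).symm
    · intro w hw
      rw [hgd w hw, filter_rmlt_succ pairwise_cellsOf r c, if_neg ?_, List.append_nil]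
      intro hmem
      exact hw (((mem_cellsOf.mp hmem).2.symm.trans hg))
  · -- nonzero cell
    have hgi : pvGetI grid r c = pvG grid cols r c := (pvG_eq_pvGetI hrc).symm
    have hrcC : (r, c) ∈ pvCellsOf grid cols (pvG grid cols r c) := self_mem_cellsOf hg
    have hCne : pvCellsOf grid cols (pvG grid cols r c) ≠ [] := fun he => by
      rw [he] at hrcC; cases hrcC
    obtain ⟨m0, hm0⟩ : ∃ m0, (pvCellsOf grid cols (pvG grid cols r c)).head? = some m0 := by
      rcases hh : (pvCellsOf grid cols (pvG grid cols r c)).head? with _ | m0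
      · exact absurd (List.head?_eq_none_iff.mp hh) hCne
      · exact ⟨m0, rfl⟩
    by_cases hvis : pvGetV vis r c = true
    · -- already flood-filled earlier: A skips, B appends the cell to its color's list
      obtain ⟨-, m1, hm1, hlt1⟩ := (hvc (r, c) hrc).mp hvis
      rw [hm0] at hm1
      cases hm1
      have hvmem : pvG grid cols r c ∈ d.keys := (hkc _).mpr ⟨hg, m0, hm0, hlt1⟩
      have hA : pvScanCell grid (grid.length : Int) cols (vis, pieces) r c = (vis, pieces) := by
        unfold pvScanCell
        rw [if_neg (by rw [hvis]; simp)]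
      have hB : pvStepB grid d r c =
          d.modify (pvG grid cols r c) [] (fun l => l ++ [(r, c)]) := by
        unfold pvStepB
        dsimp only
        rw [hgi, if_pos hg]
      rw [hA, hB]
      have hkeys' : (d.modify (pvG grid cols r c) [] (fun l => l ++ [(r, c)])).keys = d.keys := by
        rw [PySem.Dict.keys_modify, PySem.Dict.keys_insert_of_contains]
        rw [PySem.Dict.contains_eq_decide_mem_keys]
        simpa using hvmem
      refine ⟨hsh, ?_, by rw [hkeys']; exact hkeys, by rw [hkeys']; exact hnd, ?_, ?_, hpc⟩
      · intro x hx
        rw [hvc x hx]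
        refine and_congr_right fun hgx => ?_
        by_cases hgxv : pvG grid cols x.1 x.2 = pvG grid cols r c
        · rw [hgxv]
          constructor
          · rintro ⟨m, hm, -⟩
            exact ⟨m0, hm0, rmlt_succ_iff.mpr (Or.inl hlt1)⟩
          · rintro ⟨m, hm, -⟩
            exact ⟨m0, hm0, hlt1⟩
        · exact (hsucc_other _ hgxv).symm
      · intro w
        rw [hkeys', hkc w]
        refine and_congr_right fun hw => ?_
        by_cases hwv : w = pvG grid cols r c
        · subst hwv
          constructor
          · intro _; exact ⟨m0, hm0, rmlt_succ_iff.mpr (Or.inl hlt1)⟩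
          · intro _; exact ⟨m0, hm0, hlt1⟩
        · exact (hsucc_other w hwv).symm
      · intro w hw
        rw [PySem.Dict.getD_modify, filter_rmlt_succ pairwise_cellsOf r c]
        by_cases hwv : w = pvG grid cols r c
        · subst hwv
          rw [if_pos rfl, hgd _ hw, if_pos hrcC]
        · rw [if_neg hwv, hgd w hw, if_neg ?_, List.append_nil]
          intro hmem
          exact hwv ((mem_cellsOf.mp hmem).2).symm
    · -- first cell of a new piece: A flood-fills it, B opens its color's list
      have hnolt : ¬ pvRmLt m0 (r, c) := fun hlt =>
        hvis ((hvc (r, c) hrc).mpr ⟨hg, m0, hm0, hlt⟩)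
      have hm0e : m0 = (r, c) := by
        rcases head_min pairwise_cellsOf hm0 (r, c) hrcC with h | h
        · exact h.symm
        · exact absurd h hnolt
      subst hm0e
      have hfresh : ∀ x ∈ pvCellsOf grid cols (pvG grid cols r c),
          pvGetV vis x.1 x.2 = false := by
        intro x hxM
        have hxin : pvInR grid cols x := (mem_cellsOf.mp hxM).1
        rcases hb : pvGetV vis x.1 x.2 with _ | _
        · rfl
        · exfalso
          obtain ⟨hgx, m', hm', hlt⟩ := (hvc x hxin).mp hb
          rw [(mem_cellsOf.mp hxM).2, hm0] at hm'
          cases hm'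
          exact hnolt hlt
      have hchar1 : ∀ x, pvInR grid cols x → (pvGetV (pvSetV vis r c) x.1 x.2 = true ↔
          (pvGetV vis x.1 x.2 = true ∨ x ∈ ([] : List (Int × Int)) ++ [(r, c)])) := by
        intro x hx
        rw [setV_getV hsh hrc hx]
        by_cases hxe : x = (r, c)
        · subst hxe; simp
        · have hne : ¬ (x.1 = r ∧ x.2 = c) := by
            intro ⟨u, w⟩; exact hxe (Prod.ext u w)
          simp [hne, hxe]
      have hbfs := bfs_spec hcons (rfl : pvG grid cols r c = pvG grid cols r c) hg
        vis hfresh ((grid.length : Int).toNat * cols.toNat + 5) [(r, c)] []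
        (pvSetV vis r c) (setV_shape hsh hrc) hchar1 (by simp)
        (by
          intro x hx
          simp only [List.nil_append, List.mem_singleton] at hx
          subst hx
          exact hrcC)
        (by simp)
        (by rintro y _ ⟨x, hx, _⟩; cases hx)
        (by
          have hlen := length_cellsOf_le (grid := grid) (cols := cols)
            (v := pvG grid cols r c)
          simp only [List.nil_append, List.length_cons, List.length_nil, Int.toNat_natCast]
          omega)
      rcases hres : pvBfs grid (grid.length : Int) cols (pvG grid cols r c)
          ((grid.length : Int).toNat * cols.toNat + 5) [(r, c)] [] (pvSetV vis r c)
        with ⟨C, W⟩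
      rw [hres] at hbfs
      obtain ⟨hC, hWs, hWchar⟩ := hbfs
      have hA : pvScanCell grid (grid.length : Int) cols (vis, pieces) r c =
          (W, pieces ++ [(pvG grid cols r c, C)]) := by
        unfold pvScanCell
        rw [if_pos ⟨by rw [hgi]; exact hg, hvis⟩]
        dsimp only
        rw [hgi, hres]
      have hB : pvStepB grid d r c =
          d.modify (pvG grid cols r c) [] (fun l => l ++ [(r, c)]) := by
        unfold pvStepB
        dsimp only
        rw [hgi, if_pos hg]
      rw [hA, hB]
      have hnotmem : pvG grid cols r c ∉ d.keys := by
        intro h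
        obtain ⟨-, m', hm', hlt⟩ := (hkc _).mp h
        rw [hm0] at hm'
        cases hm'
        exact hnolt hlt
      have hcont : d.contains (pvG grid cols r c) = false := by
        rw [PySem.Dict.contains_eq_decide_mem_keys]
        simpa using hnotmem
      have hkeys' : (d.modify (pvG grid cols r c) [] (fun l => l ++ [(r, c)])).keys =
          d.keys ++ [pvG grid cols r c] := by
        rw [PySem.Dict.keys_modify, PySem.Dict.keys_insert_of_not_contains _ _ hcont]
      have hfilnil : (pvCellsOf grid cols (pvG grid cols r c)).filter
          (fun m => decide (pvRmLt m (r, c))) = [] := by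
        rw [List.filter_eq_nil_iff]
        intro b hb
        simp only [decide_eq_true_eq]
        exact not_rmlt_of_head pairwise_cellsOf hm0 b hb
      have hgdv : d.getD (pvG grid cols r c) [] = [] := by
        rw [hgd _ hg, hfilnil]
      refine ⟨hWs, ?_, ?_, ?_, ?_, ?_, ?_⟩
      · -- visited characterisation
        intro x hx
        rw [hWchar x hx]
        by_cases hgxv : pvG grid cols x.1 x.2 = pvG grid cols r c
        · constructor
          · intro _
            refine ⟨by rw [hgxv]; exact hg, (r, c), by rw [hgxv]; exact hm0,
              rmlt_succ_iff.mpr (Or.inr rfl)⟩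
          · intro _
            right
            have := self_mem_cellsOf (r := x.1) (c := x.2) (by rw [hgxv]; exact hg)
            rw [hgxv, Prod.mk.eta] at this
            exact this
        · have hnot : x ∉ pvCellsOf grid cols (pvG grid cols r c) := fun hmem =>
            hgxv (mem_cellsOf.mp hmem).2
          rw [or_iff_left hnot, hvc x hx]
          exact and_congr_right fun hgx => (hsucc_other _ hgxv).symm
      · rw [hkeys', hkeys]
        simp
      · rw [PySem.Dict.keys_modify]
        exact PySem.Dict.nodup_keys_insert _ _ _ hnd
      · intro w
        rw [hkeys']
        simp only [List.mem_append, List.mem_singleton]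
        by_cases hwv : w = pvG grid cols r c
        · subst hwv
          refine iff_of_true (Or.inr rfl) ⟨hg, (r, c), hm0, rmlt_succ_iff.mpr (Or.inr rfl)⟩
        · simp only [hwv, or_false]
          rw [hkc w]
          exact and_congr_right fun hw => (hsucc_other w hwv).symm
      · intro w hw
        rw [PySem.Dict.getD_modify, filter_rmlt_succ pairwise_cellsOf r c]
        by_cases hwv : w = pvG grid cols r c
        · subst hwv
          rw [if_pos rfl, hgdv, hfilnil, if_pos hrcC]
        · rw [if_neg hwv, hgd w hw, if_neg ?_, List.append_nil]
          intro hmem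
          exact hwv ((mem_cellsOf.mp hmem).2).symm
      · intro p hp
        rcases List.mem_append.mp hp with h | h
        · exact hpc p h
        · simp only [List.mem_singleton] at h
          subst h
          exact ⟨hg, hCne, hC⟩

theorem advance_row {grid : List (List Int)} {cols r : Int} {vis : List (List Bool)}
    {pieces : List (Int × List (Int × Int))} {d : PySem.Dict Int (List (Int × Int))}
    (h : pvInv grid cols (r, cols) vis pieces d) : pvInv grid cols (r + 1, 0) vis pieces d := by
  obtain ⟨hsh, hvc, hkeys, hnd, hkc, hgd, hpc⟩ := h
  have hiff : ∀ (w : Int), ∀ m ∈ pvCellsOf grid cols w,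
      (pvRmLt m (r, cols) ↔ pvRmLt m (r + 1, 0)) := by
    intro w m hm
    obtain ⟨⟨h1, h2, h3, h4⟩, -⟩ := mem_cellsOf.mp hm
    unfold pvRmLt
    constructor <;> intro <;> omega
  refine ⟨hsh, ?_, hkeys, hnd, ?_, ?_, hpc⟩
  · intro x hx
    rw [hvc x hx]
    refine and_congr_right fun hgx => exists_congr fun m => and_congr_right fun hm => ?_
    exact hiff _ m (List.mem_of_mem_head? hm)
  · intro w
    rw [hkc w]
    refine and_congr_right fun hw => exists_congr fun m => and_congr_right fun hm => ?_
    exact hiff _ m (List.mem_of_mem_head? hm)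
  · intro w hw
    rw [hgd w hw]
    refine List.filter_congr ?_
    intro m hm
    rw [decide_eq_decide]
    exact hiff _ m hm

theorem scan_cols {grid : List (List Int)} {cols : Int}
    (hcons : pvColorOK grid cols = true) {r : Int}
    (hr : 0 ≤ r ∧ r < (grid.length : Int)) :
    ∀ (n : Nat) (c : Int), cols - c = (n : Int) → 0 ≤ c →
    ∀ (vis : List (List Bool)) (pieces : List (Int × List (Int × Int)))
      (d : PySem.Dict Int (List (Int × Int))),
      pvInv grid cols (r, c) vis pieces d →
      pvInv grid cols (r, cols)
        ((PySem.List.pyRange c cols 1).foldl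
          (fun st cc => pvScanCell grid (grid.length : Int) cols st r cc) (vis, pieces)).1
        ((PySem.List.pyRange c cols 1).foldl
          (fun st cc => pvScanCell grid (grid.length : Int) cols st r cc) (vis, pieces)).2
        ((PySem.List.pyRange c cols 1).foldl (fun dd cc => pvStepB grid dd r cc) d) := by
  intro n
  induction n with
  | zero =>
    intro c hn hc0 vis pieces d hinv
    have hcc : cols = c := by omega
    rw [PySem.List.pyRange_one_eq_nil (by omega)]
    simp only [List.foldl_nil]
    subst hcc
    exact hinv
  | succ k ih =>
    intro c hn hc0 vis pieces d hinv
    have hlt : c < cols := by omega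
    rw [PySem.List.pyRange_one_cons hlt]
    simp only [List.foldl_cons]
    have hstep := scan_cell hcons ⟨hr.1, hr.2, hc0, hlt⟩ hinv
    have := ih (c + 1) (by omega) (by omega)
      (pvScanCell grid (grid.length : Int) cols (vis, pieces) r c).1
      (pvScanCell grid (grid.length : Int) cols (vis, pieces) r c).2
      (pvStepB grid d r c) hstep
    rwa [Prod.mk.eta] at this

theorem scan_rows {grid : List (List Int)} {cols : Int}
    (hcons : pvColorOK grid cols = true) (hcols0 : 0 ≤ cols) :
    ∀ (n : Nat) (r : Int), (grid.length : Int) - r = (n : Int) → 0 ≤ r →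
    ∀ (vis : List (List Bool)) (pieces : List (Int × List (Int × Int)))
      (d : PySem.Dict Int (List (Int × Int))),
      pvInv grid cols (r, 0) vis pieces d →
      pvInv grid cols ((grid.length : Int), 0)
        ((PySem.List.pyRange r (grid.length : Int) 1).foldl
          (fun st rr => (PySem.List.pyRange 0 cols 1).foldl
            (fun st cc => pvScanCell grid (grid.length : Int) cols st rr cc) st)
          (vis, pieces)).1
        ((PySem.List.pyRange r (grid.length : Int) 1).foldl
          (fun st rr => (PySem.List.pyRange 0 cols 1).foldl
            (fun st cc => pvScanCell grid (grid.length : Int) cols st rr cc) st)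
          (vis, pieces)).2
        ((PySem.List.pyRange r (grid.length : Int) 1).foldl
          (fun dd rr => (PySem.List.pyRange 0 cols 1).foldl
            (fun dd cc => pvStepB grid dd rr cc) dd) d) := by
  intro n
  induction n with
  | zero =>
    intro r hn hr0 vis pieces d hinv
    rw [show PySem.List.pyRange r ((grid.length : Int)) 1 = [] from
      PySem.List.pyRange_one_eq_nil (by omega)]
    simp only [List.foldl_nil]
    have hre : r = (grid.length : Int) := by omega
    subst hre
    exact hinv
  | succ k ih =>
    intro r hn hr0 vis pieces d hinv
    have hlt : r < (grid.length : Int) := by omega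
    rw [PySem.List.pyRange_one_cons hlt]
    simp only [List.foldl_cons]
    have hrow := scan_cols hcons ⟨hr0, hlt⟩ cols.toNat 0 (by omega) le_rfl
      vis pieces d hinv
    have hadv := advance_row hrow
    have := ih (r + 1) (by omega) (by omega)
      ((PySem.List.pyRange 0 cols 1).foldl
        (fun st cc => pvScanCell grid (grid.length : Int) cols st r cc) (vis, pieces)).1
      ((PySem.List.pyRange 0 cols 1).foldl
        (fun st cc => pvScanCell grid (grid.length : Int) cols st r cc) (vis, pieces)).2
      ((PySem.List.pyRange 0 cols 1).foldl (fun dd cc => pvStepB grid dd r cc) d) hadv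
    rwa [Prod.mk.eta] at this

theorem init_inv {grid : List (List Int)} {cols : Int} :
    pvInv grid cols (0, 0)
      (List.replicate grid.length (List.replicate cols.toNat false)) []
      (PySem.Dict.mk []) := by
  have hno : ∀ (w : Int), ∀ m ∈ pvCellsOf grid cols w, ¬ pvRmLt m (0, 0) := by
    intro w m hm
    obtain ⟨⟨h1, h2, h3, h4⟩, -⟩ := mem_cellsOf.mp hm
    unfold pvRmLt
    omega
  have hkeysnil : (PySem.Dict.mk ([] : List (Int × List (Int × Int)))).keys = [] := rfl
  refine ⟨shape_init, ?_, ?_, ?_, ?_, ?_, ?_⟩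
  · intro x hx
    rw [getV_eq shape_init hx]
    obtain ⟨h1, h2, h3, h4⟩ := hx
    have hb : x.1.toNat < grid.length := by omega
    rw [List.getElem?_replicate, if_pos hb]
    simp only [Option.getD_some]
    constructor
    · intro h
      have hlt2 : x.2.toNat < cols.toNat := by omega
      rw [List.getD_replicate false hlt2] at h
      cases h
    · rintro ⟨hgx, m, hm, hlt⟩
      exact absurd hlt (hno _ m (List.mem_of_mem_head? hm))
  · rw [hkeysnil]; rfl
  · rw [hkeysnil]; exact List.nodup_nil
  · intro w
    rw [hkeysnil]
    simp only [List.not_mem_nil, false_iff, not_and]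
    rintro hw ⟨m, hm, hlt⟩
    exact absurd hlt (hno _ m (List.mem_of_mem_head? hm))
  · intro w hw
    have hleft : (PySem.Dict.mk ([] : List (Int × List (Int × Int)))).getD w [] = [] := rfl
    rw [hleft]
    rw [eq_comm, List.filter_eq_nil_iff]
    intro m hm
    simp only [decide_eq_true_eq]
    exact hno _ m hm
  · intro p hp
    cases hp

-- ===== VERDICT (by name: the statement is the Claim_ definition above) =====
theorem solve_a61ba2ce_spec : Claim_equal_solve_a61ba2ce := by
  intro grid _ hpre
  obtain ⟨hne, hrowlens, hcons⟩ := hpre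
  unfold Spec_solve_a61ba2ce solve_a61ba2ce solve_a61ba2ce_alt
  dsimp only
  rw [Int.toNat_natCast]
  have hcols0 : (0 : Int) ≤ (((PySem.List.pyGet? grid 0).getD []).length : Int) :=
    Int.natCast_nonneg _
  have hfin := scan_rows (cols := (((PySem.List.pyGet? grid 0).getD []).length : Int))
    hcons hcols0 grid.length 0 (by simp) le_rfl
    (List.replicate grid.length
      (List.replicate (((PySem.List.pyGet? grid 0).getD []).length : Int).toNat false))
    [] (PySem.Dict.mk []) init_inv
  obtain ⟨-, -, hkeys, hnd, hkc, hgd, hpc⟩ := hfin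
  rw [assemble_foldl]
  rw [show pvAssemble (PySem.Dict.mk []) = List.replicate 4 (List.replicate 4 0) from rfl]
  rw [foldl_pieceB_congr hcons _ _ hpc]
  rw [PySem.Dict.items_eq_map_keys _ hnd ([] : List (Int × Int)), hkeys]
  congr 1
  apply List.map_congr_left
  intro k hk
  have hkmem := hk
  rw [← hkeys] at hkmem
  have hk0 : k ≠ 0 := ((hkc k).mp hkmem).1
  have hfull := hgd k hk0
  rw [List.filter_eq_self.mpr ?_] at hfull
  · rw [hfull]
  · intro m hm
    obtain ⟨⟨h1, h2, h3, h4⟩, -⟩ := mem_cellsOf.mp hm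
    simp only [decide_eq_true_eq]
    exact Or.inl h2
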